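-- pv_equiv track=rewrite | github.com/lynnoak/Redescription-Mining-with-Sequential-Data | src/data_pre.py | str2list_encode
-- ===== SOURCE A (Python) =====
-- def str2list_encode(x,names):
--     t = x.split(",")[:50]
--     s = []
--     for i in t:
--         name = ''.join(filter(str.isalpha,i))
--         num = ''.join(filter(str.isdigit,i))
--         mix = names[name]*10000000+int(num)
--         s.append([mix])
--     return s
-- ===== SOURCE B (Python) =====
-- def str2list_encode(x, names):
--     # Single fused scan over the characters: tokenizes on ',' and partitions
--     # each token into letters/digits in the same pass (no split/filter passes).
--     s = []
--     letters = ''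
--     digits = ''
--     for c in x:
--         if c == ',':
--             s.append([names[letters] * 10000000 + int(digits)])
--             if len(s) == 50:
--                 return s
--             letters = ''
--             digits = ''
--         elif c.isalpha():
--             letters += c
--         elif c.isdigit():
--             digits += c
--     s.append([names[letters] * 10000000 + int(digits)])
--     return s
-- ===== Notes on version B (the rewrite author's own statement) =====
-- stated objective: alternative
-- what changed: One fused character scan tokenizes on commas and partitions each token's letters/digits on the fly (stopping after 50 rows), replacing split + [:50] slice + two filter passes per token.
import Mathlib
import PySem

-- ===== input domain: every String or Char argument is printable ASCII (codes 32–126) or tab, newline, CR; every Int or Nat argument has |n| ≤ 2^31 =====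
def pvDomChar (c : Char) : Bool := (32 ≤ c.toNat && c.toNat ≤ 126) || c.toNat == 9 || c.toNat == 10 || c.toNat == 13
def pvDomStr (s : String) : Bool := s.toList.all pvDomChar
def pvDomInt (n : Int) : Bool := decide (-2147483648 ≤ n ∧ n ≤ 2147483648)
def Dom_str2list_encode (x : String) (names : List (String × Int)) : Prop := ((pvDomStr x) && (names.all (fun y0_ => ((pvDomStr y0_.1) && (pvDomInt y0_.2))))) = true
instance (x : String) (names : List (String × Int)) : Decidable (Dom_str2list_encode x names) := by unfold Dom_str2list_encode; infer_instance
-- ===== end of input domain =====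

-- B replaces split + slice + two filter passes per token by one fused character scan
-- that tokenizes on commas and partitions letters/digits on the fly (alternative, same cost).

-- ===== PORT A =====
-- loop body of A: name = ''.join(filter(str.isalpha,i)); num = ''.join(filter(str.isdigit,i));
-- mix = names[name]*10000000+int(num).  names[name] (KeyError) and int(num) (ValueError) are
-- ported with a 0 default; Pre_ excludes exactly the inputs where Python raises.
def pvEncA (names : List (String × Int)) (i : String) : Int :=
  let name := String.ofList (i.toList.filter PySem.Chars.isalpha)
  let num := i.toList.filter PySem.Chars.isdigit
  (PySem.Dict.getD ⟨names⟩ name 0) * 10000000 + (PySem.Int.ofChars? num).getD 0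

def str2list_encode (x : String) (names : List (String × Int)) : List (List Int) :=
  let t := ((PySem.Str.split? x ",").getD []).take 50   -- x.split(",")[:50]
  t.foldl (fun s i => s ++ [[pvEncA names i]]) []

-- ===== PORT B =====
-- names[letters]*10000000 + int(digits), with the same 0 defaults as port A (Pre_ excludes raises)
def pvTok (names : List (String × Int)) (letters digits : List Char) : Int :=
  (PySem.Dict.getD ⟨names⟩ (String.ofList letters) 0) * 10000000 + (PySem.Int.ofChars? digits).getD 0

-- the character loop of Source B: flush on ',', early return at 50 rows, partition letters/digits
def pvScanB (names : List (String × Int)) : List Char → List (List Int) → List Char → List Char → List (List Int)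
  | [], s, letters, digits => s ++ [[pvTok names letters digits]]
  | c :: cs, s, letters, digits =>
    if c = ',' then
      let s' := s ++ [[pvTok names letters digits]]
      if s'.length = 50 then s' else pvScanB names cs s' [] []
    else if PySem.Chars.isalpha c then pvScanB names cs s (letters ++ [c]) digits
    else if PySem.Chars.isdigit c then pvScanB names cs s letters (digits ++ [c])
    else pvScanB names cs s letters digits

def str2list_encode_alt (x : String) (names : List (String × Int)) : List (List Int) :=
  pvScanB names x.toList [] [] []

-- ===== PRECONDITION & SPEC =====
-- Pre_ excludes exactly the inputs on which Python A raises: a token among the first 50 whose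
-- digit characters are empty (int('') is a ValueError) or whose letter string is not a key of
-- names (KeyError).
def Pre_str2list_encode (x : String) (names : List (String × Int)) : Prop :=
  ∀ i ∈ ((PySem.Str.split? x ",").getD []).take 50,
    i.toList.filter PySem.Chars.isdigit ≠ [] ∧
    (PySem.Dict.get? ⟨names⟩ (String.ofList (i.toList.filter PySem.Chars.isalpha))).isSome = true
instance (x : String) (names : List (String × Int)) : Decidable (Pre_str2list_encode x names) := by
  unfold Pre_str2list_encode; infer_instance
def pvWitness_str2list_encode : String × (List (String × Int)) := ("ab12,c3", [("ab", 2), ("c", 5)])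

def Spec_str2list_encode (x : String) (names : List (String × Int)) (out : List (List Int)) : Prop := out = str2list_encode_alt x names
instance (x : String) (names : List (String × Int)) (out : List (List Int)) : Decidable (Spec_str2list_encode x names out) := by unfold Spec_str2list_encode; infer_instance

-- ===== CLAIM (what is proved, stated in full; the proofs are below) =====
def Claim_equal_str2list_encode : Prop := ∀ (x : String) (names : List (String × Int)), Dom_str2list_encode x names → Pre_str2list_encode x names → Spec_str2list_encode x names (str2list_encode x names)

-- ===== LEMMAS AND PROOFS =====

-- splitting a char list on ',' (reference form of x.split(","))
def pvSplit : List Char → List (List Char)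
  | [] => [[]]
  | c :: cs =>
    if c = ',' then [] :: pvSplit cs
    else match pvSplit cs with
      | [] => [[c]]
      | t :: ts => (c :: t) :: ts

def pvMapHead (f : List Char → List Char) : List (List Char) → List (List Char)
  | [] => []
  | t :: ts => f t :: ts

theorem pvSplit_ne_nil (cs : List Char) : pvSplit cs ≠ [] := by
  cases cs with
  | nil => simp [pvSplit]
  | cons c cs =>
    simp only [pvSplit]
    split
    · simp
    · split <;> simp

theorem pvGo_spec (l : List Char) : ∀ (fuel : Nat) (cur : List Char) (acc : List (List Char)),
    l.length ≤ fuel →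
    PySem.Chars.splitOn.go [','] fuel l cur acc
      = acc.reverse ++ pvMapHead (fun t => cur.reverse ++ t) (pvSplit l) := by
  induction l with
  | nil =>
    intro fuel cur acc _
    cases fuel <;> simp [PySem.Chars.splitOn.go, pvSplit, pvMapHead]
  | cons c cs ih =>
    intro fuel cur acc hfuel
    cases fuel with
    | zero => simp at hfuel
    | succ f =>
      rw [PySem.Chars.splitOn.go]
      by_cases hc : c = ','
      · subst hc
        have hp : ([','] : List Char).isPrefixOf (',' :: cs) = true := by
          simp [List.isPrefixOf]
        simp only [hp, if_true]
        have hdrop : List.drop ([','] : List Char).length (',' :: cs) = cs := by simp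
        rw [hdrop, ih f [] ((cur.reverse) :: acc) (by simpa using hfuel)]
        simp [pvSplit, pvMapHead]
        cases h : pvSplit cs with
        | nil => exact absurd h (pvSplit_ne_nil cs)
        | cons t ts => simp
      · have hp : ([','] : List Char).isPrefixOf (c :: cs) = false := by
          simp [List.isPrefixOf]
          intro h; exact absurd h.symm hc
        simp only [hp]
        rw [if_neg (by simp)]
        rw [ih f (c :: cur) acc (by simpa using Nat.le_of_succ_le_succ hfuel)]
        simp only [pvSplit, if_neg hc]
        cases h : pvSplit cs with
        | nil => exact absurd h (pvSplit_ne_nil cs)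
        | cons t ts => simp [pvMapHead]

theorem pvSplitOn_comma (cs : List Char) : PySem.Chars.splitOn cs [','] = pvSplit cs := by
  rw [show PySem.Chars.splitOn cs [','] = PySem.Chars.splitOn.go [','] (cs.length + 1) cs [] []
      from rfl]
  rw [pvGo_spec cs (cs.length + 1) [] [] (Nat.le_succ _)]
  cases h : pvSplit cs with
  | nil => exact absurd h (pvSplit_ne_nil cs)
  | cons t ts => simp [pvMapHead]

def pvRow (names : List (String × Int)) (t : List Char) : List Int :=
  [pvTok names (t.filter PySem.Chars.isalpha) (t.filter PySem.Chars.isdigit)]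

def pvRows (names : List (String × Int)) (letters digits : List Char) : List (List Char) → List (List Int)
  | [] => []
  | t :: ts =>
      [pvTok names (letters ++ t.filter PySem.Chars.isalpha) (digits ++ t.filter PySem.Chars.isdigit)]
        :: ts.map (pvRow names)

theorem pvRows_nil_nil (names : List (String × Int)) (l : List (List Char)) :
    pvRows names [] [] l = l.map (pvRow names) := by
  cases l <;> simp [pvRows, pvRow]

theorem pv_alpha_not_digit (c : Char) (h : PySem.Chars.isalpha c = true) :
    PySem.Chars.isdigit c = false := by
  simp only [PySem.Chars.isalpha, PySem.Chars.isupper, PySem.Chars.islower,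
        PySem.Chars.isdigit, Bool.or_eq_true, Bool.and_eq_true, decide_eq_true_eq,
        Bool.and_eq_false_iff, decide_eq_false_iff_not, Char.le_def] at *
  rcases h with ⟨h1, h2⟩ | ⟨h1, h2⟩ <;> right <;> intro h3 <;>
    simp_all [UInt32.le_iff_toNat_le] <;> omega

theorem pvScan_spec (names : List (String × Int)) (cs : List Char) :
    ∀ (s : List (List Int)) (letters digits : List Char), s.length < 50 →
    pvScanB names cs s letters digits
      = s ++ (pvRows names letters digits (pvSplit cs)).take (50 - s.length) := by
  induction cs with
  | nil =>
    intro s letters digits hs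
    have : 50 - s.length = (49 - s.length) + 1 := by omega
    simp [pvScanB, pvSplit, pvRows, this]
  | cons c cs ih =>
    intro s letters digits hs
    simp only [pvScanB]
    by_cases hc : c = ','
    · subst hc
      simp only [if_true]
      by_cases h50 : (s ++ [[pvTok names letters digits]]).length = 50
      · rw [if_pos h50]
        have : 50 - s.length = 1 := by simp at h50; omega
        simp [pvSplit, pvRows, this]
      · rw [if_neg h50]
        rw [ih (s ++ [[pvTok names letters digits]]) [] [] (by simp at h50 ⊢; omega)]
        rw [pvRows_nil_nil]
        have harith : 50 - s.length = ((50 - (s ++ [[pvTok names letters digits]]).length) + 1) := by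
          simp at h50 ⊢; omega
        simp [pvSplit, pvRows, harith]
    · rw [if_neg hc]
      obtain ⟨t, ts, hsp⟩ : ∃ t ts, pvSplit cs = t :: ts := by
        cases h : pvSplit cs with
        | nil => exact absurd h (pvSplit_ne_nil cs)
        | cons t ts => exact ⟨t, ts, rfl⟩
      have hsplit : pvSplit (c :: cs) = (c :: t) :: ts := by
        simp [pvSplit, if_neg hc, hsp]
      by_cases ha : PySem.Chars.isalpha c = true
      · rw [if_pos ha, ih s (letters ++ [c]) digits hs]
        rw [hsplit, hsp]
        simp [pvRows, ha, pv_alpha_not_digit c ha]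
      · rw [if_neg ha]
        by_cases hd : PySem.Chars.isdigit c = true
        · rw [if_pos hd, ih s letters (digits ++ [c]) hs]
          rw [hsplit, hsp]
          simp [pvRows, hd, Bool.of_not_eq_true ha]
        · rw [if_neg hd, ih s letters digits hs]
          rw [hsplit, hsp]
          simp [pvRows, Bool.of_not_eq_true ha, Bool.of_not_eq_true hd]

theorem pvFoldl_app {α β : Type} (ts : List α) (g : α → List β) :
    ∀ s : List (List β), ts.foldl (fun s i => s ++ [g i]) s = s ++ ts.map g := by
  induction ts with
  | nil => intro s; simp
  | cons t ts ih => intro s; simp [List.foldl_cons, ih]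

theorem pvA_eq (x : String) (names : List (String × Int)) :
    str2list_encode x names = ((pvSplit x.toList).take 50).map (pvRow names) := by
  unfold str2list_encode
  have hsep : ("," : String).toList = [','] := by decide
  have : PySem.Str.split? x "," = some ((pvSplit x.toList).map String.ofList) := by
    unfold PySem.Str.split?
    rw [show PySem.Chars.split? x.toList (",").toList
          = some (PySem.Chars.splitOn x.toList [',']) by
        rw [hsep]; simp [PySem.Chars.split?]]
    rw [pvSplitOn_comma]
    rfl
  rw [this]
  simp only [Option.getD_some]
  rw [← List.map_take, pvFoldl_app]
  simp only [List.nil_append, List.map_map]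
  apply List.map_congr_left
  intro t _
  simp [pvEncA, pvRow, pvTok, Function.comp]

-- ===== VERDICT (by name: the statement is the Claim_ definition above) =====
theorem str2list_encode_spec : Claim_equal_str2list_encode := by
  intro x names _ _
  unfold Spec_str2list_encode str2list_encode_alt
  rw [pvScan_spec names x.toList [] [] [] (by simp)]
  rw [pvRows_nil_nil, pvA_eq]
  simp [List.map_take]
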